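-- pv_equiv track=rewrite | github.com/esdandreu/KickStart | 2021/H/painter.py | solution
-- ===== SOURCE A (Python) =====
-- colormap = {
--     'U'  : set(),
--     'R'  : {'R'},
--     'Y'  : {'Y'},
--     'B'  : {'B'},
--     'O'  : {'R', 'Y'},
--     'P'  : {'R', 'B'},
--     'G'  : {'Y', 'B'},
--     'A'  : {'R', 'Y', 'B'},
-- }
--
-- def solution(P: str):
--     painting = [colormap[square] for square in P]
--     strokes = 0
--     stroke = set()
--     for colors in painting:
--         strokes += len(colors - stroke)
--         stroke = colors
--     return strokes
-- ===== SOURCE B (Python) =====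
-- colormap = {
--     'U'  : set(),
--     'R'  : {'R'},
--     'Y'  : {'Y'},
--     'B'  : {'B'},
--     'O'  : {'R', 'Y'},
--     'P'  : {'R', 'B'},
--     'G'  : {'Y', 'B'},
--     'A'  : {'R', 'Y', 'B'},
-- }
--
-- def solution(P: str):
--     painting = [colormap[square] for square in P]
--     strokes = 0
--     for color in 'RYB':
--         present = False
--         for colors in painting:
--             now = color in colors
--             if now and not present:
--                 strokes += 1
--             present = now
--     return strokes
-- ===== Notes on version B (the rewrite author's own statement) =====
-- stated objective: alternative
-- what changed: A compares each square's color set to the previous square's set, counting newly appearing colors in a single pass; B makes one pass per primary color (R, Y, B) counting rising edges (runs) of that color with a single boolean flag, and sums the three run counts.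
import Mathlib
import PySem

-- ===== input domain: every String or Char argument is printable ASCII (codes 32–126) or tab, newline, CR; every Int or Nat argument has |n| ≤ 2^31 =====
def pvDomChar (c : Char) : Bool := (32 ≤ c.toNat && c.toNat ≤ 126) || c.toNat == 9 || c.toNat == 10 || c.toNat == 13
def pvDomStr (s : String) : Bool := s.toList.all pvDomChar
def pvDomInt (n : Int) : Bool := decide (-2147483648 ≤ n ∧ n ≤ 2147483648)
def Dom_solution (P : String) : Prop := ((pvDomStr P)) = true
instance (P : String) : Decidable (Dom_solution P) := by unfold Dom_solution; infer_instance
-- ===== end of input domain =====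

-- B replaces A's previous-square set comparison by three independent per-color passes that
-- count runs of squares containing each primary color (objective: alternative decomposition).

-- ===== PORT A =====
def pvColormap : PySem.Dict Char (PySem.Set Char) :=
  PySem.Dict.ofList
    [('U', PySem.Set.ofList []), ('R', PySem.Set.ofList ['R']), ('Y', PySem.Set.ofList ['Y']),
     ('B', PySem.Set.ofList ['B']), ('O', PySem.Set.ofList ['R', 'Y']),
     ('P', PySem.Set.ofList ['R', 'B']), ('G', PySem.Set.ofList ['Y', 'B']),
     ('A', PySem.Set.ofList ['R', 'Y', 'B'])]

def pvStepA (st : Int × PySem.Set Char) (colors : PySem.Set Char) : Int × PySem.Set Char :=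
  (st.1 + PySem.Set.len (PySem.Set.diff colors st.2), colors)

def solution (P : String) : Int :=
  match P.toList.mapM (fun square => pvColormap.get? square) with
  | none => 0   -- Python raises KeyError here; excluded by Pre_solution
  | some painting => (painting.foldl pvStepA ((0 : Int), PySem.Set.empty)).1

-- ===== PORT B =====
def pvStepB (color : Char) (st : Int × Bool) (colors : PySem.Set Char) : Int × Bool :=
  let now := PySem.Set.contains colors color
  (if now && !st.2 then st.1 + 1 else st.1, now)

def solution_alt (P : String) : Int :=
  match P.toList.mapM (fun square => pvColormap.get? square) with
  | none => 0   -- Python raises KeyError here; excluded by Pre_solution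
  | some painting =>
    "RYB".toList.foldl
      (fun strokes color => (painting.foldl (pvStepB color) (strokes, false)).1) 0

-- ===== PRECONDITION & SPEC =====
-- Pre_ excludes exactly the strings containing a character outside colormap's keys,
-- on which the Python A (and B) raises KeyError.
def Pre_solution (P : String) : Prop :=
  (P.toList.all (fun c => ['U', 'R', 'Y', 'B', 'O', 'P', 'G', 'A'].contains c)) = true
instance (P : String) : Decidable (Pre_solution P) := by unfold Pre_solution; infer_instance

def pvWitness_solution : String := "A"

def Spec_solution (P : String) (out : Int) : Prop := out = solution_alt P
instance (P : String) (out : Int) : Decidable (Spec_solution P out) := by unfold Spec_solution; infer_instance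

-- ===== CLAIM (what is proved, stated in full; the proofs are below) =====
def Claim_equal_solution : Prop := ∀ (P : String), Dom_solution P → Pre_solution P → Spec_solution P (solution P)

-- ===== LEMMAS AND PROOFS =====

-- the eight color sets colormap can produce (plus the initial empty stroke)
def pvV : List (List Char) :=
  [[], ['R'], ['Y'], ['B'], ['R', 'Y'], ['R', 'B'], ['Y', 'B'], ['R', 'Y', 'B']]

theorem pv_mapM_colormap (L : List Char)
    (h : ∀ c ∈ L, c ∈ ['U', 'R', 'Y', 'B', 'O', 'P', 'G', 'A']) :
    ∃ painting, L.mapM (fun square => pvColormap.get? square) = some painting ∧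
      ∀ s ∈ painting, s ∈ pvV := by
  induction L with
  | nil => exact ⟨[], rfl, by simp⟩
  | cons c T ih =>
    obtain ⟨pt, hpt, hv⟩ := ih (fun x hx => h x (List.mem_cons_of_mem _ hx))
    have hc := h c (List.mem_cons_self ..)
    have hval : ∃ v, pvColormap.get? c = some v ∧ v ∈ pvV := by
      fin_cases hc
      exacts [⟨[], by decide, by decide⟩, ⟨['R'], by decide, by decide⟩,
        ⟨['Y'], by decide, by decide⟩, ⟨['B'], by decide, by decide⟩,
        ⟨['R', 'Y'], by decide, by decide⟩, ⟨['R', 'B'], by decide, by decide⟩,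
        ⟨['Y', 'B'], by decide, by decide⟩, ⟨['R', 'Y', 'B'], by decide, by decide⟩]
    obtain ⟨v, hvc, hvV⟩ := hval
    refine ⟨v :: pt, by simp [List.mapM_cons, hvc, hpt], ?_⟩
    intro s hs
    rcases List.mem_cons.mp hs with rfl | hs
    · exact hvV
    · exact hv s hs

theorem pv_shiftB (c : Char) (T : List (PySem.Set Char)) :
    ∀ (x m : Int) (p : Bool),
      (T.foldl (pvStepB c) (x + m, p)).1 = (T.foldl (pvStepB c) (x, p)).1 + m := by
  induction T with
  | nil => intro x m p; rfl
  | cons s T ih =>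
    intro x m p
    simp only [List.foldl_cons, pvStepB]
    by_cases hnow : (PySem.Set.contains s c && !p) = true
    · simp only [hnow, if_true]
      rw [show x + m + 1 = (x + 1) + m by ring, ih]
    · simp only [hnow, Bool.false_eq_true, if_false]
      exact ih x m _

def pvInd (c : Char) (s : List Char) (p : Bool) : Int :=
  if PySem.Set.contains s c && !p then 1 else 0

theorem pv_keyStep (s d : List Char) (hs : s ∈ pvV) (hd : d ∈ pvV) :
    PySem.Set.len (PySem.Set.diff s d) =
      pvInd 'R' s (PySem.Set.contains d 'R') + pvInd 'Y' s (PySem.Set.contains d 'Y')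
        + pvInd 'B' s (PySem.Set.contains d 'B') := by
  fin_cases hs <;> fin_cases hd <;> decide

theorem pv_stepB_eq (c : Char) (s : PySem.Set Char) (a : Int) (p : Bool) :
    pvStepB c (a, p) s = (a + pvInd c s p, PySem.Set.contains s c) := by
  simp only [pvStepB, pvInd]
  split_ifs <;> simp

theorem pv_main (T : List (PySem.Set Char)) (hT : ∀ s ∈ T, s ∈ pvV) :
    ∀ d, d ∈ pvV → ∀ a : Int,
      (T.foldl pvStepA (a, d)).1 =
        (T.foldl (pvStepB 'B')
          ((T.foldl (pvStepB 'Y')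
            ((T.foldl (pvStepB 'R') (a, PySem.Set.contains d 'R')).1,
              PySem.Set.contains d 'Y')).1,
            PySem.Set.contains d 'B')).1 := by
  induction T with
  | nil => intro d _ a; rfl
  | cons s T ih =>
    intro d hd a
    have hs : s ∈ pvV := hT s (List.mem_cons_self ..)
    have hT' : ∀ x ∈ T, x ∈ pvV := fun x hx => hT x (List.mem_cons_of_mem _ hx)
    simp only [List.foldl_cons, pvStepA, pv_stepB_eq]
    rw [pv_keyStep s d hs hd]
    set eR := pvInd 'R' s (PySem.Set.contains d 'R') with heR
    set eY := pvInd 'Y' s (PySem.Set.contains d 'Y') with heY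
    set eB := pvInd 'B' s (PySem.Set.contains d 'B') with heB
    rw [show a + (eR + eY + eB) = a + eR + eY + eB by ring]
    rw [ih hT' s hs (a + eR + eY + eB)]
    rw [show a + eR + eY + eB = (a + eR) + (eY + eB) by ring,
      pv_shiftB 'R' T (a + eR) (eY + eB)]
    rw [show (T.foldl (pvStepB 'R') (a + eR, PySem.Set.contains s 'R')).1 + (eY + eB)
        = ((T.foldl (pvStepB 'R') (a + eR, PySem.Set.contains s 'R')).1 + eY) + eB by ring,
      pv_shiftB 'Y' T _ eB, pv_shiftB 'B' T _ eB]

-- ===== VERDICT (by name: the statement is the Claim_ definition above) =====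
theorem solution_spec : Claim_equal_solution := by
  intro P _ hPre
  unfold Spec_solution solution solution_alt
  have hPre' : ∀ c ∈ P.toList, c ∈ ['U', 'R', 'Y', 'B', 'O', 'P', 'G', 'A'] := by
    intro c hc
    have := List.all_eq_true.mp hPre c hc
    simpa using this
  obtain ⟨painting, hmap, hv⟩ := pv_mapM_colormap P.toList hPre'
  rw [hmap]
  have h3 : "RYB".toList = ['R', 'Y', 'B'] := by decide
  rw [h3]
  simp only [List.foldl_cons, List.foldl_nil]
  have := pv_main painting hv [] (by decide) 0
  simpa [PySem.Set.empty] using this
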